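-- pv_equiv track=rewrite | github.com/andreanidouglas/Rename_File | Movie_Renamer.py | file_renamer
-- ===== SOURCE A (Python) =====
-- def file_renamer(file_path, dest):
--     #Create the rename string with '_' in place of '.'
--     file_canonical = file_path.split('\\')
--     file = file_canonical[len(file_canonical)-1]
--
--     file_name = file.split('.')
--     changed_name = ''
--     for part_index in range( len(file_name) -1):
--         if part_index == len(file_name) -2:
--             changed_name += file_name[part_index]
--         else:
--             changed_name += file_name[part_index] + '_'
--
--     path = ''
--     for path_index in range( len(file_canonical)-1):
--         path += file_canonical[path_index] + '\\'
--
--     if dest == '':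
--         return path  + changed_name + '.' + file_name[len(file_name)-1]
--     return dest + '\\' + changed_name + '.' + file_name[len(file_name)-1]
-- ===== SOURCE B (Python) =====
-- def file_renamer(file_path, dest):
--     # Partition-based: no loops, no index bookkeeping.
--     head, sep, file = file_path.rpartition('\\')
--     stem, _dot, ext = file.rpartition('.')
--     renamed = ''.join('_' if ch == '.' else ch for ch in stem) + '.' + ext
--     if dest == '':
--         return head + sep + renamed
--     return dest + '\\' + renamed
-- ===== Notes on version B (the rewrite author's own statement) =====
-- stated objective: simpler
-- what changed: Replaces the two split-and-index loops (split('\\'), split('.'), range-indexed joins) with loop-free rpartition slicing: rpartition('\\') yields the directory prefix and file, rpartition('.') yields stem and extension, and dots in the stem are mapped to underscores in one pass.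
import Mathlib
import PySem

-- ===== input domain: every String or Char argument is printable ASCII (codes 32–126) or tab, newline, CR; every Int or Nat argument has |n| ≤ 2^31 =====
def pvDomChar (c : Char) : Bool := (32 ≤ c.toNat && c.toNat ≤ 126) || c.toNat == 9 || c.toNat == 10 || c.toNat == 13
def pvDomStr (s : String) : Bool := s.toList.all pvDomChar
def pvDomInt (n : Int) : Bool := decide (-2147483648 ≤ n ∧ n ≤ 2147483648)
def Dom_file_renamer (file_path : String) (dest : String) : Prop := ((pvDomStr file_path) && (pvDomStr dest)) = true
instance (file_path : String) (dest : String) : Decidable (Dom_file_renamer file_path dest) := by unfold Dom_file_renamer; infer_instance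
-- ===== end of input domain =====

-- B replaces A's split-and-index loops by loop-free rpartition slicing (objective: simpler); return values proved equal on all inputs.

-- ===== PORT A =====
-- the separators "\\" and "." are nonempty, so split? always returns some; getD [] is never the default
def file_renamer (file_path : String) (dest : String) : String :=
  let file_canonical := (PySem.Str.split? file_path "\\").getD []
  let file := PySem.List.pyGetD file_canonical (PySem.List.len file_canonical - 1) ""
  let file_name := (PySem.Str.split? file ".").getD []
  let changed_name := (PySem.List.pyRange 0 (PySem.List.len file_name - 1) 1).foldl
    (fun changed_name part_index =>
      if part_index == PySem.List.len file_name - 2 then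
        changed_name ++ PySem.List.pyGetD file_name part_index ""
      else
        changed_name ++ PySem.List.pyGetD file_name part_index "" ++ "_") ""
  let path := (PySem.List.pyRange 0 (PySem.List.len file_canonical - 1) 1).foldl
    (fun path path_index => path ++ PySem.List.pyGetD file_canonical path_index "" ++ "\\") ""
  if dest == "" then
    path ++ changed_name ++ "." ++ PySem.List.pyGetD file_name (PySem.List.len file_name - 1) ""
  else
    dest ++ "\\" ++ changed_name ++ "." ++ PySem.List.pyGetD file_name (PySem.List.len file_name - 1) ""

-- ===== PORT B =====
-- hand port of str.rpartition for a single-character separator (both separators in Source B are single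
-- characters): returns some (before, after) split at the LAST occurrence of c, none if c is absent —
-- exactly Python's rpartition behaviour on this domain
def rpartChars (c : Char) : List Char → Option (List Char × List Char)
  | [] => none
  | a :: rest =>
    match rpartChars c rest with
    | some (h, t) => some (a :: h, t)
    | none => if a = c then some ([], rest) else none

def rpartitionChar (s : String) (c : Char) : String × String × String :=
  match rpartChars c s.toList with
  | some (h, t) => (String.ofList h, String.ofList [c], String.ofList t)
  | none => ("", "", s)

def file_renamer_alt (file_path : String) (dest : String) : String :=
  let p1 := rpartitionChar file_path '\\'
  let head := p1.1
  let sep := p1.2.1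
  let file := p1.2.2
  let p2 := rpartitionChar file '.'
  let stem := p2.1
  let ext := p2.2.2
  -- ''.join('_' if ch == '.' else ch for ch in stem)
  let renamed := String.ofList (stem.toList.map (fun ch => if ch = '.' then '_' else ch)) ++ "." ++ ext
  if dest = "" then head ++ sep ++ renamed
  else dest ++ "\\" ++ renamed

-- ===== PRECONDITION & SPEC =====
def Spec_file_renamer (file_path : String) (dest : String) (out : String) : Prop := out = file_renamer_alt file_path dest
instance (file_path : String) (dest : String) (out : String) : Decidable (Spec_file_renamer file_path dest out) := by unfold Spec_file_renamer; infer_instance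

-- ===== CLAIM (what is proved, stated in full; the proofs are below) =====
def Claim_equal_file_renamer : Prop := ∀ (file_path : String) (dest : String), Dom_file_renamer file_path dest → Spec_file_renamer file_path dest (file_renamer file_path dest)

-- ===== LEMMAS AND PROOFS =====

def split1 (c : Char) : List Char → List (List Char)
  | [] => [[]]
  | a :: rest =>
    if a = c then [] :: split1 c rest
    else (a :: (split1 c rest).headI) :: (split1 c rest).tail

theorem split1_ne_nil (c : Char) (l : List Char) : split1 c l ≠ [] := by
  cases l with
  | nil => simp [split1]
  | cons a rest => simp only [split1]; split <;> simp

def mapHead (f : List Char → List Char) : List (List Char) → List (List Char)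
  | [] => []
  | x :: xs => f x :: xs

theorem splitOn_go_spec (c : Char) (l : List Char) : ∀ (fuel : Nat) (cur : List Char)
    (acc : List (List Char)), l.length < fuel →
    PySem.Chars.splitOn.go [c] fuel l cur acc
      = acc.reverse ++ mapHead (cur.reverse ++ ·) (split1 c l) := by
  induction l with
  | nil =>
    intro fuel cur acc hf
    obtain ⟨f, rfl⟩ := Nat.exists_eq_succ_of_ne_zero (by omega : fuel ≠ 0)
    rw [PySem.Chars.splitOn.go]
    · simp [split1, mapHead]
    all_goals omega
  | cons a rest ih =>
    intro fuel cur acc hf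
    obtain ⟨f, rfl⟩ := Nat.exists_eq_succ_of_ne_zero (by omega : fuel ≠ 0)
    rw [PySem.Chars.splitOn.go]
    by_cases hac : c = a
    · subst hac
      have hpre : [c].isPrefixOf (c :: rest) = true := by simp [List.isPrefixOf]
      simp only [hpre, if_true, List.length_cons, List.length_nil, List.drop_succ_cons,
        List.drop_zero]
      rw [ih f [] (cur.reverse :: acc) (by simpa using Nat.lt_of_succ_lt_succ hf)]
      cases hq : split1 c rest <;> simp [split1, mapHead, hq]
    · have hpre : [c].isPrefixOf (a :: rest) = false := by
        simp [List.isPrefixOf]; exact fun h => absurd h hac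
      simp only [hpre, Bool.false_eq_true, if_false]
      rw [ih f (a :: cur) acc (by simpa using Nat.lt_of_succ_lt_succ hf)]
      obtain ⟨y, ys, hys⟩ := List.exists_cons_of_ne_nil (split1_ne_nil c rest)
      simp [split1, hys, mapHead, if_neg (Ne.symm hac)]

theorem splitOn_eq_split1 (c : Char) (l : List Char) :
    PySem.Chars.splitOn l [c] = split1 c l := by
  rw [PySem.Chars.splitOn, splitOn_go_spec c l (l.length + 1) [] [] (by omega)]
  cases h : split1 c l <;> simp [mapHead]

theorem rpart_split (c : Char) (s : List Char) :
    (rpartChars c s = none ∧ split1 c s = [s]) ∨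
    (∃ h t, rpartChars c s = some (h, t) ∧ s = h ++ c :: t ∧
      split1 c s = split1 c h ++ [t]) := by
  induction s with
  | nil => left; simp [rpartChars, split1]
  | cons a rest ih =>
    rcases ih with ⟨hnone, hsp⟩ | ⟨h, t, hsome, hseq, hsp⟩
    · by_cases hac : a = c
      · subst hac
        right; exact ⟨[], rest, by simp [rpartChars, hnone], rfl, by simp [split1, hsp]⟩
      · left
        constructor
        · simp [rpartChars, hnone, hac]
        · simp [split1, hac, hsp]
    · right
      refine ⟨a :: h, t, by simp [rpartChars, hsome], by rw [hseq]; rfl, ?_⟩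
      by_cases hac : a = c
      · subst hac; simp [split1, hsp]
      · obtain ⟨y, ys, hys⟩ := List.exists_cons_of_ne_nil (split1_ne_nil c h)
        simp [split1, hac, hsp, hys]

theorem join_split1 (c u : Char) (s : List Char) :
    PySem.Chars.join [u] (split1 c s) = s.map (fun a => if a = c then u else a) := by
  induction s with
  | nil => simp only [split1]; rw [PySem.Chars.join_singleton]; rfl
  | cons a rest ih =>
    obtain ⟨y, ys, hys⟩ := List.exists_cons_of_ne_nil (split1_ne_nil c rest)
    by_cases hac : a = c
    · rw [hac]
      rw [show split1 c (c :: rest) = [] :: split1 c rest by simp [split1]]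
      rw [hys, PySem.Chars.join_cons_cons, ← hys, ih]
      simp
    · rw [show split1 c (a :: rest) = (a :: (split1 c rest).headI) :: (split1 c rest).tail by
        simp [split1, hac]]
      rw [hys]
      simp only [List.headI, List.tail]
      have hstep : PySem.Chars.join [u] ((a :: y) :: ys) = a :: PySem.Chars.join [u] (y :: ys) := by
        cases ys with
        | nil => simp [PySem.Chars.join_singleton]
        | cons z zs => rw [PySem.Chars.join_cons_cons, PySem.Chars.join_cons_cons]; simp
      rw [hstep, ← hys, ih]
      simp [hac]

theorem flatMap_range_getD (g : List Char → List Char) (q : List (List Char)) :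
    ∀ (k : Nat), k ≤ q.length →
    (List.range k).flatMap (fun i => g (q.getD i [])) = (q.take k).flatMap g := by
  intro k
  induction k with
  | zero => simp
  | succ k ih =>
    intro hk
    have hkq : k < q.length := by omega
    have ht : q.take (k+1) = q.take k ++ [q[k]'hkq] := List.take_succ_eq_append_getElem hkq
    rw [List.range_succ, List.flatMap_append, ih (by omega), ht, List.flatMap_append]
    simp [List.getD, List.getElem?_eq_getElem hkq]

theorem flatMap_append_last (u : Char) (q : List (List Char)) (x : List Char) :
    q.flatMap (· ++ [u]) ++ x = PySem.Chars.join [u] (q ++ [x]) := by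
  induction q with
  | nil => simp [PySem.Chars.join_singleton]
  | cons a q' ih =>
    cases q' with
    | nil => simp [PySem.Chars.join_cons_cons, PySem.Chars.join_singleton]
    | cons b q'' =>
      have hsh : (a :: b :: q'') ++ [x] = a :: b :: (q'' ++ [x]) := by simp
      rw [hsh, PySem.Chars.join_cons_cons]
      have ih' : List.flatMap (fun z => z ++ [u]) (b :: q'') ++ x
          = PySem.Chars.join [u] (b :: (q'' ++ [x])) := by simpa using ih
      rw [← ih']
      simp

theorem flatMap_sep (c : Char) (q : List (List Char)) (hq : q ≠ []) :
    q.flatMap (· ++ [c]) = PySem.Chars.join [c] q ++ [c] := by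
  induction q with
  | nil => simp at hq
  | cons a q' ih =>
    cases q' with
    | nil => simp [PySem.Chars.join_singleton]
    | cons b q'' =>
      rw [PySem.Chars.join_cons_cons]
      simp only [List.flatMap_cons] at *
      rw [ih (by simp)]
      simp

theorem toList_foldl_append (l : List Int) (g : Int → String) (init : String) :
    (l.foldl (fun acc x => acc ++ g x) init).toList
      = init.toList ++ l.flatMap (fun x => (g x).toList) := by
  induction l generalizing init with
  | nil => simp
  | cons x xs ih => simp [ih, String.toList_append]

theorem getD_map_ofList (Q : List (List Char)) (k : Nat) :
    ((Q.map String.ofList).getD k "").toList = Q.getD k [] := by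
  by_cases hk : k < Q.length
  · simp [List.getD, List.getElem?_map, List.getElem?_eq_getElem hk]
  · simp [List.getD, List.getElem?_eq_none_iff.mpr (by simpa using hk)]

theorem pyGetD_last_map (Q : List (List Char)) (hQ : Q ≠ []) :
    PySem.List.pyGetD (Q.map String.ofList) (PySem.List.len (Q.map String.ofList) - 1) ""
      = String.ofList (Q.getLast hQ) := by
  have hlen : PySem.List.len (Q.map String.ofList) = (Q.length : Int) := by
    simp [PySem.List.len_eq]
  have hQ1 : 1 ≤ Q.length := List.length_pos_iff.mpr hQ
  rw [hlen, PySem.List.pyGetD_eq_getElem (Q.map String.ofList) ""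
    (by omega) (by simp)]
  have : ((Q.length : Int) - 1).toNat = Q.length - 1 := by omega
  simp only [this]
  rw [List.getElem_map, List.getLast_eq_getElem]

theorem path_eq (Q : List (List Char)) (hQ : Q ≠ []) :
    ((PySem.List.pyRange 0 (PySem.List.len (Q.map String.ofList) - 1) 1).foldl
      (fun acc i => acc ++ PySem.List.pyGetD (Q.map String.ofList) i "" ++ "\\") "").toList
    = Q.dropLast.flatMap (· ++ ['\\']) := by
  have hQ1 : 1 ≤ Q.length := List.length_pos_iff.mpr hQ
  have hlen : PySem.List.len (Q.map String.ofList) = (Q.length : Int) := by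
    simp [PySem.List.len_eq]
  rw [hlen]
  rw [PySem.List.foldl_congr_mem _ _
    (fun acc i => acc ++ (PySem.List.pyGetD (Q.map String.ofList) i "" ++ "\\")) _
    (fun acc x _ => by rw [String.append_assoc])]
  rw [toList_foldl_append, PySem.List.pyRange_one]
  have htn : ((Q.length : Int) - 1 - 0).toNat = Q.length - 1 := by omega
  rw [htn, List.flatMap_map]
  have hfun : ∀ k ∈ List.range (Q.length - 1),
      ((PySem.List.pyGetD (Q.map String.ofList) ((0 : Int) + (k : Int)) "" ++ "\\")).toList
        = (Q.getD k []) ++ ['\\'] := by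
    intro k _
    rw [String.toList_append, zero_add, PySem.List.pyGetD_natCast, getD_map_ofList]
    rfl
  rw [List.flatMap_congr hfun]
  rw [flatMap_range_getD (· ++ ['\\']) Q (Q.length - 1) (by omega)]
  rw [← List.dropLast_eq_take]
  simp

theorem changed_eq (Q : List (List Char)) (hQ : Q ≠ []) :
    ((PySem.List.pyRange 0 (PySem.List.len (Q.map String.ofList) - 1) 1).foldl
      (fun acc i =>
        if i == PySem.List.len (Q.map String.ofList) - 2 then
          acc ++ PySem.List.pyGetD (Q.map String.ofList) i ""
        else
          acc ++ PySem.List.pyGetD (Q.map String.ofList) i "" ++ "_") "").toList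
    = PySem.Chars.join ['_'] Q.dropLast := by
  have hQ1 : 1 ≤ Q.length := List.length_pos_iff.mpr hQ
  have hlen : PySem.List.len (Q.map String.ofList) = (Q.length : Int) := by
    simp [PySem.List.len_eq]
  rw [hlen]
  rw [PySem.List.foldl_congr_mem _ _
    (fun acc i => acc ++ (if i == (Q.length : Int) - 2
      then PySem.List.pyGetD (Q.map String.ofList) i ""
      else PySem.List.pyGetD (Q.map String.ofList) i "" ++ "_")) _
    (fun acc x _ => by
      by_cases hx : x = (Q.length : Int) - 2 <;> simp [hx, String.append_assoc])]
  rw [toList_foldl_append, PySem.List.pyRange_one]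
  have htn : ((Q.length : Int) - 1 - 0).toNat = Q.length - 1 := by omega
  rw [htn, List.flatMap_map]
  rcases Nat.lt_or_ge Q.length 2 with hL | hL
  · -- Q = [x] : empty loop, empty join
    have : Q.length - 1 = 0 := by omega
    rw [this]
    obtain ⟨x, hx⟩ : ∃ x, Q = [x] := by
      cases Q with
      | nil => simp at hQ1
      | cons a q => cases q with
        | nil => exact ⟨a, rfl⟩
        | cons b q' => simp at hL
    simp [hx, PySem.Chars.join_nil]
  · have hfun : ∀ k ∈ List.range (Q.length - 1),
        ((fun i => (if i == (Q.length : Int) - 2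
          then PySem.List.pyGetD (Q.map String.ofList) i ""
          else PySem.List.pyGetD (Q.map String.ofList) i "" ++ "_").toList) ((0 : Int) + (k : Int)))
        = (fun k => Q.getD k [] ++ if k = Q.length - 2 then [] else ['_']) k := by
      intro k hk
      simp only [zero_add]
      by_cases hke : k = Q.length - 2
      · have hb : (((k : Int)) == (Q.length : Int) - 2) = true := by
          rw [beq_iff_eq]; omega
        rw [if_pos hb, if_pos hke, PySem.List.pyGetD_natCast, getD_map_ofList]
        simp
      · have hb : ¬((((k : Int)) == (Q.length : Int) - 2) = true) := by
          simp only [beq_iff_eq]; omega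
        rw [if_neg hb, if_neg hke, String.toList_append, PySem.List.pyGetD_natCast,
          getD_map_ofList]
        rfl
    rw [List.flatMap_congr hfun]
    have hsplit : Q.length - 1 = (Q.length - 2) + 1 := by omega
    rw [hsplit, List.range_succ, List.flatMap_append]
    have hbody : ∀ k ∈ List.range (Q.length - 2),
        (fun k => Q.getD k [] ++ if k = Q.length - 2 then [] else ['_']) k
          = (fun k => (fun x => x ++ ['_']) (Q.getD k [])) k := by
      intro k hk
      simp only [List.mem_range] at hk
      simp [show k ≠ Q.length - 2 by omega]
    rw [List.flatMap_congr hbody]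
    rw [flatMap_range_getD (· ++ ['_']) Q (Q.length - 2) (by omega)]
    have hget : Q.getD (Q.length - 2) [] = Q[Q.length - 2]'(by omega) := by
      simp [List.getD, List.getElem?_eq_getElem (by omega : Q.length - 2 < Q.length)]
    simp only [List.flatMap_cons, List.flatMap_nil, List.append_nil, if_true]
    rw [hget, flatMap_append_last,
      ← List.take_succ_eq_append_getElem (by omega)]
    have h21 : (Q.length - 2) + 1 = Q.length - 1 := by omega
    rw [h21, ← List.dropLast_eq_take]
    simp

theorem split?_eval (s : String) (sep : String) (c : Char) (hsep : sep.toList = [c]) :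
    (PySem.Str.split? s sep).getD [] = (split1 c s.toList).map String.ofList := by
  rw [PySem.Str.split?, hsep, PySem.Chars.split?]
  simp [splitOn_eq_split1]

theorem map_if_self (c : Char) (l : List Char) :
    l.map (fun a => if a = c then c else a) = l := by
  induction l with
  | nil => rfl
  | cons a l ih => by_cases ha : a = c <;> simp [ha, ih]

theorem file_renamer_eq (fp dest : String) : file_renamer fp dest = file_renamer_alt fp dest := by
  simp only [file_renamer, file_renamer_alt, rpartitionChar]
  rw [split?_eval fp "\\" '\\' rfl]
  rcases rpart_split '\\' fp.toList with ⟨hB, hsB⟩ | ⟨h, t, hB, hseq, hsB⟩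
  · rw [hsB, hB]
    rw [pyGetD_last_map [fp.toList] (by simp)]
    simp only [List.getLast_singleton, String.ofList_toList]
    rw [split?_eval fp "." '.' rfl]
    rcases rpart_split '.' fp.toList with ⟨hD, hsD⟩ | ⟨h2, t2, hD, hgeq2, hsD⟩
    · rw [hsD, hD, pyGetD_last_map [fp.toList] (by simp)]
      simp only [List.getLast_singleton]
      rw [← String.toList_inj]
      by_cases hd : dest = ""
      · simp [hd, String.toList_append]
      · simp [hd, String.toList_append]
    · rw [hsD, hD, pyGetD_last_map (split1 '.' h2 ++ [t2]) (by simp)]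
      have hch := changed_eq (split1 '.' h2 ++ [t2]) (by simp)
      rw [List.dropLast_concat, join_split1] at hch
      have hp1 := path_eq [fp.toList] (by simp)
      by_cases hd : dest = ""
      · rw [if_pos (show (dest == "") = true by simp [hd]), if_pos hd, ← String.toList_inj]
        simp only [String.toList_append]
        rw [hch, hp1]
        simp
      · rw [if_neg (show ¬(dest == "") = true by simp [hd]), if_neg hd, ← String.toList_inj]
        simp only [String.toList_append]
        rw [hch]
        simp
  · -- backslash present: fp.toList = h ++ '\\' :: t
    rw [hsB, hB]
    have hp := path_eq (split1 '\\' h ++ [t]) (by simp)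
    rw [List.dropLast_concat, flatMap_sep '\\' _ (split1_ne_nil _ _), join_split1,
      map_if_self] at hp
    rw [pyGetD_last_map (split1 '\\' h ++ [t]) (by simp)]
    simp only [List.getLast_concat]
    rw [split?_eval (String.ofList t) "." '.' rfl]
    simp only [String.toList_ofList]
    rcases rpart_split '.' t with ⟨hD, hsD⟩ | ⟨h2, t2, hD, hgeq2, hsD⟩
    · rw [hsD, hD, pyGetD_last_map [t] (by simp)]
      simp only [List.getLast_singleton]
      by_cases hd : dest = ""
      · rw [if_pos (show (dest == "") = true by simp [hd]), if_pos hd, ← String.toList_inj]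
        simp only [String.toList_append]
        rw [hp]
        simp
      · rw [if_neg (show ¬(dest == "") = true by simp [hd]), if_neg hd, ← String.toList_inj]
        simp only [String.toList_append]
        simp
    · rw [hsD, hD, pyGetD_last_map (split1 '.' h2 ++ [t2]) (by simp)]
      have hch := changed_eq (split1 '.' h2 ++ [t2]) (by simp)
      rw [List.dropLast_concat, join_split1] at hch
      by_cases hd : dest = ""
      · rw [if_pos (show (dest == "") = true by simp [hd]), if_pos hd, ← String.toList_inj]
        simp only [String.toList_append]
        rw [hch, hp]
        simp
      · rw [if_neg (show ¬(dest == "") = true by simp [hd]), if_neg hd, ← String.toList_inj]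
        simp only [String.toList_append]
        rw [hch]
        simp

-- ===== VERDICT (by name: the statement is the Claim_ definition above) =====
theorem file_renamer_spec : Claim_equal_file_renamer := by
  intro file_path dest _
  unfold Spec_file_renamer
  exact file_renamer_eq file_path dest
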